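-- pv_equiv track=rewrite | github.com/hoang2454050218-creator/RISK-CAST- | app/db/schema_versioning.py | get_migration_path
-- ===== SOURCE A (Python) =====
-- from typing import Optional, List, Dict, Any
--
-- def get_migration_path(
--     current_version: str,
--     target_version: str,
--     available_migrations: List[str],
-- ) -> List[str]:
--     """
--     Get ordered list of migrations to apply.
--
--     Returns migrations between current and target versions.
--     """
--     # Filter and sort migrations
--     path = []
--
--     for migration in sorted(available_migrations):
--         if migration > current_version and migration <= target_version:
--             path.append(migration)
--
--     return path
-- ===== SOURCE B (Python) =====
-- from typing import List
--
--
-- def get_migration_path(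
--     current_version: str,
--     target_version: str,
--     available_migrations: List[str],
-- ) -> List[str]:
--     """Sort once, then binary-search both interval bounds and slice."""
--     ordered = sorted(available_migrations)
--
--     def bisect_right(x: str) -> int:
--         lo, hi = 0, len(ordered)
--         while lo < hi:
--             mid = (lo + hi) // 2
--             if x < ordered[mid]:
--                 hi = mid
--             else:
--                 lo = mid + 1
--         return lo
--
--     return ordered[bisect_right(current_version):bisect_right(target_version)]
-- ===== Notes on version B (the rewrite author's own statement) =====
-- stated objective: alternative
-- what changed: Instead of scanning every sorted element with a per-item range test, B binary-searches the two interval boundaries (hand-written bisect_right, since A imports no stdlib modules) and returns the slice between them, so the post-sort work drops from a linear filter to O(log n).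
import Mathlib
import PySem

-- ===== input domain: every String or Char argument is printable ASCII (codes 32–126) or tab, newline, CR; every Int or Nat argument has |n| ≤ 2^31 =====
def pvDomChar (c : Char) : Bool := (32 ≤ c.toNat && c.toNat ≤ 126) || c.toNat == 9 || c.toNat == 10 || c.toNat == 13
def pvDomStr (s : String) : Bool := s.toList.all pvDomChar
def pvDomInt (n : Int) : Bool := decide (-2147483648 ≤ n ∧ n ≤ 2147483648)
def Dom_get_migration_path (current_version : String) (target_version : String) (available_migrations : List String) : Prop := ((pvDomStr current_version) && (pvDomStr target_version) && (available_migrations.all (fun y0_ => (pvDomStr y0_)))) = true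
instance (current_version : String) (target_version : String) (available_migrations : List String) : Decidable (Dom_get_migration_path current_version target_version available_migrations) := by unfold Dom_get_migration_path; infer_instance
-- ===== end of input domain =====

-- B replaces A's linear filter over the sorted list by binary searches for the
-- two interval boundaries and a slice of the sorted list between them.
-- ===== PORT A =====
def get_migration_path (current_version : String) (target_version : String) (available_migrations : List String) : List String :=
  -- path = []; for migration in sorted(available_migrations): if migration > current and migration <= target: path.append(migration); return path
  (PySem.List.sorted available_migrations (fun m => m) false).foldl
    (fun path migration =>
      if current_version < migration ∧ migration ≤ target_version then path ++ [migration] else path)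
    []

-- ===== PORT B =====
-- the hand-written bisect_right while-loop of Source B (fuel = hi - lo bounds the iterations)
def pvBisectLoop (ordered : List String) (x : String) : Nat → Nat → Nat → Nat
  | 0, lo, _ => lo
  | fuel + 1, lo, hi =>
    if lo < hi then
      let mid := (lo + hi) / 2
      if x < ordered.getD mid "" then pvBisectLoop ordered x fuel lo mid
      else pvBisectLoop ordered x fuel (mid + 1) hi
    else lo

def pvBisectRight (ordered : List String) (x : String) : Nat :=
  pvBisectLoop ordered x ordered.length 0 ordered.length

def get_migration_path_alt (current_version : String) (target_version : String) (available_migrations : List String) : List String :=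
  let ordered := PySem.List.sorted available_migrations (fun m => m) false
  PySem.List.slice ordered (some (pvBisectRight ordered current_version : Int))
    (some (pvBisectRight ordered target_version : Int))

-- ===== PRECONDITION & SPEC =====
def Spec_get_migration_path (current_version : String) (target_version : String) (available_migrations : List String) (out : List String) : Prop := out = get_migration_path_alt current_version target_version available_migrations
instance (current_version : String) (target_version : String) (available_migrations : List String) (out : List String) : Decidable (Spec_get_migration_path current_version target_version available_migrations out) := by unfold Spec_get_migration_path; infer_instance

-- ===== CLAIM (what is proved, stated in full; the proofs are below) =====
def Claim_equal_get_migration_path : Prop := ∀ (current_version : String) (target_version : String) (available_migrations : List String), Dom_get_migration_path current_version target_version available_migrations → Spec_get_migration_path current_version target_version available_migrations (get_migration_path current_version target_version available_migrations)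

-- ===== LEMMAS AND PROOFS =====

-- the bisect loop is a correct upper-bound search on a sorted list
theorem pvBisectLoop_spec (s : List String) (x : String)
    (hs : s.Pairwise (· ≤ ·)) :
    ∀ (fuel lo hi : Nat), lo ≤ hi → hi ≤ s.length → hi - lo ≤ fuel →
      (∀ j (hj : j < s.length), j < lo → s[j] ≤ x) →
      (∀ j (hj : j < s.length), hi ≤ j → x < s[j]) →
      pvBisectLoop s x fuel lo hi ≤ s.length ∧
      (∀ j (hj : j < s.length), j < pvBisectLoop s x fuel lo hi → s[j] ≤ x) ∧
      (∀ j (hj : j < s.length), pvBisectLoop s x fuel lo hi ≤ j → x < s[j]) := by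
  have hmono := List.pairwise_iff_getElem.mp hs
  intro fuel
  induction fuel with
  | zero =>
    intro lo hi h1 h2 h3 hL hR
    have : lo = hi := by omega
    subst this
    have hr : pvBisectLoop s x 0 lo lo = lo := rfl
    rw [hr]
    exact ⟨by omega, hL, hR⟩
  | succ fuel ih =>
    intro lo hi h1 h2 h3 hL hR
    by_cases hlt : lo < hi
    · have hmidlt : (lo + hi) / 2 < s.length := by omega
      have hget : s.getD ((lo + hi) / 2) "" = s[(lo + hi) / 2] := List.getD_eq_getElem s "" hmidlt
      by_cases hx : x < s.getD ((lo + hi) / 2) ""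
      · have hres : pvBisectLoop s x (fuel + 1) lo hi = pvBisectLoop s x fuel lo ((lo + hi) / 2) := by
          simp only [pvBisectLoop]
          rw [if_pos hlt, if_pos hx]
        rw [hres]
        apply ih lo ((lo + hi) / 2) (by omega) (by omega) (by omega) hL
        intro j hj hmid
        rw [hget] at hx
        rcases Nat.eq_or_lt_of_le hmid with heq | hlt2
        · exact heq ▸ hx
        · exact hx.trans_le (hmono _ _ hmidlt hj hlt2)
      · have hres : pvBisectLoop s x (fuel + 1) lo hi = pvBisectLoop s x fuel ((lo + hi) / 2 + 1) hi := by
          simp only [pvBisectLoop]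
          rw [if_pos hlt, if_neg hx]
        rw [hres]
        have hxle : s[(lo + hi) / 2] ≤ x := by rw [hget] at hx; exact le_of_not_gt hx
        apply ih ((lo + hi) / 2 + 1) hi (by omega) h2 (by omega)
        · intro j hj hjlt
          rcases Nat.lt_or_ge j ((lo + hi) / 2) with hlt2 | hge
          · exact le_trans (hmono _ _ hj hmidlt hlt2) hxle
          · have : j = (lo + hi) / 2 := by omega
            exact this ▸ hxle
        · exact hR
    · have : pvBisectLoop s x (fuel + 1) lo hi = lo := by
        simp only [pvBisectLoop]
        rw [if_neg hlt]
      have hlohi : lo = hi := by omega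
      rw [this, hlohi]
      exact ⟨h2, fun j hj hjlt => hL j hj (hlohi ▸ hjlt), hR⟩

theorem pvBisectRight_spec (s : List String) (x : String)
    (hs : s.Pairwise (· ≤ ·)) :
    pvBisectRight s x ≤ s.length ∧
    (∀ j (hj : j < s.length), j < pvBisectRight s x → s[j] ≤ x) ∧
    (∀ j (hj : j < s.length), pvBisectRight s x ≤ j → x < s[j]) :=
  pvBisectLoop_spec s x hs s.length 0 s.length (Nat.zero_le _) (le_refl _) (by omega)
    (fun j hj hjlt => absurd hjlt (Nat.not_lt_zero j))
    (fun j hj hle => absurd hj (Nat.not_lt.mpr hle))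

-- a filter whose truth set is exactly the index window [lo, hi) is the drop/take slice
theorem filter_eq_drop_take (p : String → Bool) :
    ∀ (s : List String) (lo hi : Nat), hi ≤ s.length →
      (∀ j (hj : j < s.length), p s[j] = decide (lo ≤ j ∧ j < hi)) →
      s.filter p = (s.drop lo).take (hi - lo) := by
  intro s
  induction s with
  | nil => intro lo hi _ _; simp
  | cons a rest ih =>
    intro lo hi hhi h
    have ha := h 0 (by simp)
    by_cases h0 : lo = 0 ∧ 0 < hi
    · obtain ⟨rfl, hpos⟩ := h0
      have hpa : p a = true := by simpa [hpos] using ha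
      have hrest : rest.filter p = (rest.drop 0).take ((hi - 1) - 0) := by
        apply ih 0 (hi - 1) (by simp at hhi; omega)
        intro j hj
        have := h (j + 1) (by simp; omega)
        simpa [Nat.lt_sub_iff_add_lt, hpos] using this
      obtain ⟨k, rfl⟩ : ∃ k, hi = k + 1 := ⟨hi - 1, by omega⟩
      have hsp : ((a :: rest).drop 0).take (k + 1 - 0) = a :: (rest.drop 0).take (k + 1 - 1 - 0) := by
        simp
      rw [List.filter_cons, if_pos hpa, hsp, hrest]
    · have hpa : p a = false := by
        have ha' : p a = decide (lo ≤ 0 ∧ 0 < hi) := by simpa using ha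
        rw [ha', decide_eq_false_iff_not]
        omega
      rcases Nat.eq_zero_or_pos lo with hlo | hlo
      · subst hlo
        have hhi0 : hi = 0 := by omega
        subst hhi0
        have : rest.filter p = (rest.drop 0).take 0 := by
          apply ih 0 0 (by omega)
          intro j hj
          have := h (j + 1) (by simp; omega)
          simpa using this
        simpa [List.filter_cons, hpa] using this
      · obtain ⟨l, rfl⟩ : ∃ l, lo = l + 1 := ⟨lo - 1, by omega⟩
        have : rest.filter p = (rest.drop l).take ((hi - 1) - l) := by
          apply ih l (hi - 1) (by simp at hhi; omega)
          intro j hj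
          have := h (j + 1) (by simpa using Nat.succ_lt_succ hj)
          simp only [List.getElem_cons_succ] at this
          rw [this]
          simp only [decide_eq_decide]
          omega
        rw [List.filter_cons, if_neg (by simp [hpa]), List.drop_succ_cons, this]
        congr 1
        omega

-- ===== VERDICT (by name: the statement is the Claim_ definition above) =====
theorem get_migration_path_spec : Claim_equal_get_migration_path := by
  intro c t avail _
  unfold Spec_get_migration_path get_migration_path get_migration_path_alt
  set s := PySem.List.sorted avail (fun m => m) false with hsdef
  have hs : s.Pairwise (· ≤ ·) := by
    simpa using PySem.List.sorted_pairwise avail (fun m => m)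
  have hc := pvBisectRight_spec s c hs
  have ht := pvBisectRight_spec s t hs
  set lo := pvBisectRight s c
  set hi := pvBisectRight s t
  have hfold : s.foldl (fun path m => if c < m ∧ m ≤ t then path ++ [m] else path) [] =
      s.filter (fun m => decide (c < m ∧ m ≤ t)) := by
    simpa using PySem.List.foldl_append_ite_eq_filter (fun m => c < m ∧ m ≤ t) s []
  have hslice : PySem.List.slice s (some (lo : Int)) (some (hi : Int)) =
      (s.drop lo).take (hi - lo) := by
    rw [PySem.List.slice_toNat s (Int.natCast_nonneg lo) (Int.natCast_nonneg hi)]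
    simp
  rw [hfold, hslice]
  apply filter_eq_drop_take _ s lo hi ht.1
  intro j hj
  simp only [decide_eq_decide]
  apply and_congr
  · exact ⟨fun h => Nat.le_of_not_lt (fun hl => absurd (hc.2.1 j hj hl) (not_le.mpr h)),
      fun h => hc.2.2 j hj h⟩
  · exact ⟨fun h => Nat.lt_of_not_le (fun hge => absurd (ht.2.2 j hj hge) (not_lt.mpr h)),
      fun h => ht.2.1 j hj h⟩
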